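-- pv_equiv track=rewrite | github.com/Huang-py056/ISGFANv2 | baseline/private_runner/run_private_baseline.py | find_normal_class_indices
-- ===== SOURCE A (Python) =====
-- def find_normal_class_indices(class_names):
--     normal_indices = []
--     for idx, name in enumerate(class_names):
--         up_name = name.upper()
--         if up_name in {"L0", "NO_L", "NORMAL", "HEALTHY"}:
--             normal_indices.append(idx)
--     if normal_indices:
--         return normal_indices
--     for idx, name in enumerate(class_names):
--         if "L0" in name.upper():
--             return [idx]
--     return [0]
-- ===== SOURCE B (Python) =====
-- def find_normal_class_indices(class_names):
--     normal_indices = []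
--     first_l0 = None
--     for idx, name in enumerate(class_names):
--         up = name.upper()
--         if up in {"L0", "NO_L", "NORMAL", "HEALTHY"}:
--             normal_indices.append(idx)
--         elif first_l0 is None and "L0" in up:
--             first_l0 = idx
--     if normal_indices:
--         return normal_indices
--     return [first_l0] if first_l0 is not None else [0]
-- ===== Notes on version B (the rewrite author's own statement) =====
-- stated objective: simpler
-- what changed: Replaces A's two separate scans (collect exact matches, then rescan for the first 'L0' substring) with one pass that maintains both the match list and the first-substring index simultaneously.
import Mathlib
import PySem

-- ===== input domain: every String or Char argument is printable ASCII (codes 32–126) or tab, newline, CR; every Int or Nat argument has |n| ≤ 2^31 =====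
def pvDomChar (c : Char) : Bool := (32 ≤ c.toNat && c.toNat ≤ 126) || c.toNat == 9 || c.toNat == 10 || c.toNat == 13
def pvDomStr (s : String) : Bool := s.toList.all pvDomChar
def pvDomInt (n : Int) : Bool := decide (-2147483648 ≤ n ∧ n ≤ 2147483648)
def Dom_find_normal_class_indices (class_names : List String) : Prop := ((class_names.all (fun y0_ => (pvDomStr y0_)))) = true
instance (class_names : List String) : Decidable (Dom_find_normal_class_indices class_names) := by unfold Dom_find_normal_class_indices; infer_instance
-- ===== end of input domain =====

-- B fuses A's two scans into one pass that also tracks the first 'L0'-substring index (simpler; same cost).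

-- the shared membership test: name.upper() in {"L0", "NO_L", "NORMAL", "HEALTHY"}
def pvIsNorm (up : String) : Bool :=
  up == "L0" || up == "NO_L" || up == "NORMAL" || up == "HEALTHY"

-- ===== PORT A =====
-- A's second loop: first index whose uppercase contains "L0", else [0]
def pvFindL0 : List (Int × String) → List Int
  | [] => [(0 : Int)]
  | p :: rest =>
      if PySem.Str.isIn "L0" (PySem.Str.upper p.2) then [p.1] else pvFindL0 rest

def find_normal_class_indices (class_names : List String) : List Int :=
  let normal_indices :=
    (PySem.List.enumerate class_names).foldl
      (fun acc p => if pvIsNorm (PySem.Str.upper p.2) then acc ++ [p.1] else acc) []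
  if normal_indices ≠ [] then normal_indices
  else pvFindL0 (PySem.List.enumerate class_names)

-- ===== PORT B =====
-- B's single loop, carrying (normal_indices, first_l0)
def pvBLoop : List (Int × String) → List Int → Option Int → List Int × Option Int
  | [], acc, first => (acc, first)
  | p :: rest, acc, first =>
      let up := PySem.Str.upper p.2
      if pvIsNorm up then pvBLoop rest (acc ++ [p.1]) first
      else if first.isNone && PySem.Str.isIn "L0" up then pvBLoop rest acc (some p.1)
      else pvBLoop rest acc first

def find_normal_class_indices_alt (class_names : List String) : List Int :=
  let r := pvBLoop (PySem.List.enumerate class_names) [] none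
  if r.1 ≠ [] then r.1
  else match r.2 with
    | some i => [i]
    | none => [(0 : Int)]

-- ===== PRECONDITION & SPEC =====
def Spec_find_normal_class_indices (class_names : List String) (out : List Int) : Prop := out = find_normal_class_indices_alt class_names
instance (class_names : List String) (out : List Int) : Decidable (Spec_find_normal_class_indices class_names out) := by unfold Spec_find_normal_class_indices; infer_instance

-- ===== CLAIM (what is proved, stated in full; the proofs are below) =====
def Claim_equal_find_normal_class_indices : Prop := ∀ (class_names : List String), Dom_find_normal_class_indices class_names → Spec_find_normal_class_indices class_names (find_normal_class_indices class_names)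

-- ===== LEMMAS AND PROOFS =====

lemma pvBLoop_fst (l : List (Int × String)) (acc : List Int) (first : Option Int) :
    (pvBLoop l acc first).1
      = acc ++ (l.filter (fun p => pvIsNorm (PySem.Str.upper p.2))).map (·.1) := by
  induction l generalizing acc first with
  | nil => simp [pvBLoop]
  | cons p rest ih =>
      simp only [pvBLoop]
      split_ifs <;> simp [*]

lemma pvBLoop_snd_some (l : List (Int × String)) (acc : List Int) (i : Int) :
    (pvBLoop l acc (some i)).2 = some i := by
  induction l generalizing acc with
  | nil => simp [pvBLoop]
  | cons p rest ih =>
      simp only [pvBLoop]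
      split_ifs <;> simp_all

lemma pvBLoop_snd_eq_findL0 (l : List (Int × String)) (acc : List Int)
    (h : ∀ p ∈ l, pvIsNorm (PySem.Str.upper p.2) = false) :
    (match (pvBLoop l acc none).2 with
      | some i => [i]
      | none => [(0 : Int)]) = pvFindL0 l := by
  induction l generalizing acc with
  | nil => simp [pvBLoop, pvFindL0]
  | cons p rest ih =>
      have hp := h p (by simp)
      have ih' := ih acc (fun q hq => h q (by simp [hq]))
      by_cases hin : PySem.Chars.isIn ['L', '0'] (PySem.Chars.upper p.2.toList)
      · simp [pvBLoop, pvFindL0, hp, hin, pvBLoop_snd_some]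
      · simpa [pvBLoop, pvFindL0, hp, hin] using ih'

-- ===== VERDICT (by name: the statement is the Claim_ definition above) =====
theorem find_normal_class_indices_spec : Claim_equal_find_normal_class_indices := by
  intro class_names _
  unfold Spec_find_normal_class_indices find_normal_class_indices find_normal_class_indices_alt
  simp only [PySem.List.foldl_append_if, pvBLoop_fst, List.nil_append]
  by_cases hne :
      ((PySem.List.enumerate class_names).filter
        (fun p => pvIsNorm (PySem.Str.upper p.2))).map (·.1) ≠ []
  · simp [hne]
  · push Not at hne
    have hfil : (PySem.List.enumerate class_names).filter
        (fun p => pvIsNorm (PySem.Str.upper p.2)) = [] := by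
      simpa using hne
    have hall : ∀ p ∈ PySem.List.enumerate class_names,
        pvIsNorm (PySem.Str.upper p.2) = false := by
      intro p hp
      have := List.filter_eq_nil_iff.mp hfil p hp
      simpa using this
    simp only [hfil, List.map_nil, ne_eq, not_true_eq_false, if_false,
      pvBLoop_snd_eq_findL0 _ _ hall]
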